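-- pv_equiv track=rewrite | github.com/sherlock-0327/ITAI-2025 | 02_2023141461076_guozheng/The100PrisonersProblem.py | loop_strategy
-- ===== SOURCE A (Python) =====
-- def loop_strategy(boxes, N, K):
--     """策略2：循环策略，每个囚犯从自己编号的盒子开始，按纸条跳转，最多K次"""
--     success_count = 0
--     for prisoner in range(N):
--         current = prisoner
--         for _ in range(K):
--             current = boxes[current]  # 跳转到下一个盒子
--             if current == prisoner:   # 找到自己的编号
--                 success_count += 1
--                 break
--     return success_count
-- ===== SOURCE B (Python) =====
-- def loop_strategy(boxes, N, K):
--     # Advance all prisoners' pointers in lockstep; a prisoner succeeds iff his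
--     # number reappears within min(K, n) steps (a first return, if any, happens
--     # within n steps), so the step loop is capped at n instead of K.
--     if N <= 0 or K <= 0:
--         return 0
--     n = len(boxes)
--     steps = K if K < n else n
--     cur = list(range(n))
--     found = [False] * n
--     for _ in range(steps):
--         cur = [boxes[c] for c in cur]
--         for p in range(n):
--             if cur[p] == p:
--                 found[p] = True
--     return sum(found[:N])
-- ===== Notes on version B (the rewrite author's own statement) =====
-- stated objective: alternative
-- what changed: Instead of simulating up to K jumps separately for each prisoner, B advances all n pointers in lockstep and caps the number of rounds at min(K, n), using the fact that a first return to the start, if any, happens within n steps; successes are collected in a boolean table and summed once.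
-- outside the precondition, e.g. on loop_strategy([0, 8, -1, 7], 1, 8): A returns 1, B raises IndexError; on loop_strategy([-1], 1, 2): A returns 0, B returns 0; on loop_strategy([5, 0], 1, 1): A returns 0, B returns 0
import Mathlib
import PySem

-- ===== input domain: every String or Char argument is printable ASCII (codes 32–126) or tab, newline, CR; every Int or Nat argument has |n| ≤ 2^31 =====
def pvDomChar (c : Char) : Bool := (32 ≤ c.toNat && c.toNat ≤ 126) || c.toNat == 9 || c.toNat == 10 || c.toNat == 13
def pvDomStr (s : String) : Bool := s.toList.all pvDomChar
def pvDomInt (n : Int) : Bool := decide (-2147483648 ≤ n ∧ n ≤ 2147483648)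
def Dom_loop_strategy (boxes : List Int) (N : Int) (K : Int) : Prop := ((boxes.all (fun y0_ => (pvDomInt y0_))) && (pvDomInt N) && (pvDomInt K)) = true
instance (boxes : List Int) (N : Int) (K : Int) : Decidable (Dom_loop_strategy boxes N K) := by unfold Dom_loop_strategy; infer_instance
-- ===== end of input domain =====

-- B advances all prisoners' pointers in lockstep, capping the rounds at min(K, n)
-- (a first return, if any, occurs within n steps); same return value as A on Pre_.

-- ===== PORT A =====
-- inner 'for _ in range(K)' loop of A: jump, compare, break on success
def pvInnerA (boxes : List Int) (prisoner : Int) : Nat → Int → Bool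
  | 0, _ => false
  | k+1, current =>
    let cur := PySem.List.pyGetD boxes current 0
    if cur = prisoner then true else pvInnerA boxes prisoner k cur

def loop_strategy (boxes : List Int) (N : Int) (K : Int) : Int :=
  (PySem.List.pyRange 0 N 1).foldl
    (fun acc prisoner => if pvInnerA boxes prisoner K.toNat prisoner then acc + 1 else acc) 0

-- ===== PORT B =====
-- one round: cur = [boxes[c] for c in cur]; mark found[p] where cur[p] == p
def pvStepB (boxes : List Int) (n : Nat) (st : List Int × List Bool) : List Int × List Bool :=
  let cur' := st.1.map (fun c => PySem.List.pyGetD boxes c 0)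
  let found' := (List.range n).map (fun p => st.2.getD p false || decide (cur'.getD p 0 = Int.ofNat p))
  (cur', found')

def loop_strategy_alt (boxes : List Int) (N : Int) (K : Int) : Int :=
  if N ≤ 0 ∨ K ≤ 0 then 0 else
    let n := boxes.length
    let steps : Nat := min K.toNat n
    let res := (List.range steps).foldl (fun st _ => pvStepB boxes n st)
        ((List.range n).map (fun p => Int.ofNat p), List.replicate n false)
    (res.2.take N.toNat).foldl (fun a b => a + (if b then (1 : Int) else 0)) 0

-- ===== PRECONDITION & SPEC =====
-- Pre_ admits all inputs where no jump is simulated (N ≤ 0 or K ≤ 0) and otherwise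
-- requires N ≤ len(boxes) and every box label to be a valid index: it excludes inputs
-- on which A raises IndexError, and — outside the problem's natural domain — inputs
-- with negative or too-large labels where A may return via negative-index wraparound.
def Pre_loop_strategy (boxes : List Int) (N : Int) (K : Int) : Prop :=
  N ≤ 0 ∨ K ≤ 0 ∨ (N ≤ boxes.length ∧ ∀ x ∈ boxes, 0 ≤ x ∧ x < boxes.length)
instance (boxes : List Int) (N : Int) (K : Int) : Decidable (Pre_loop_strategy boxes N K) := by
  unfold Pre_loop_strategy; infer_instance

def pvWitness_loop_strategy : List Int × Int × Int := ([1, 0, 2], 3, 2)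

def Spec_loop_strategy (boxes : List Int) (N : Int) (K : Int) (out : Int) : Prop := out = loop_strategy_alt boxes N K
instance (boxes : List Int) (N : Int) (K : Int) (out : Int) : Decidable (Spec_loop_strategy boxes N K out) := by unfold Spec_loop_strategy; infer_instance

-- ===== CLAIM (what is proved, stated in full; the proofs are below) =====
def Claim_equal_loop_strategy : Prop := ∀ (boxes : List Int) (N : Int) (K : Int), Dom_loop_strategy boxes N K → Pre_loop_strategy boxes N K → Spec_loop_strategy boxes N K (loop_strategy boxes N K)

-- ===== LEMMAS AND PROOFS =====

-- the jump function both programs iterate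
def pvG (boxes : List Int) (c : Int) : Int := PySem.List.pyGetD boxes c 0

-- "the prisoner's number reappears within t jumps", as a Bool
def pvHit (boxes : List Int) (t : Nat) (p : Int) : Bool :=
  (List.range' 1 t).any (fun j => (pvG boxes)^[j] p == p)

lemma pvHit_iff (boxes : List Int) (t : Nat) (p : Int) :
    pvHit boxes t p = true ↔ ∃ j, 1 ≤ j ∧ j ≤ t ∧ (pvG boxes)^[j] p = p := by
  simp only [pvHit, List.any_eq_true, List.mem_range'_1, beq_iff_eq]
  constructor
  · rintro ⟨j, ⟨h1, h2⟩, h3⟩; exact ⟨j, h1, by omega, h3⟩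
  · rintro ⟨j, h1, h2, h3⟩; exact ⟨j, ⟨h1, by omega⟩, h3⟩

-- A's inner loop succeeds iff the prisoner's number reappears within k jumps
lemma pvInnerA_iff (boxes : List Int) (p : Int) (k : Nat) (c : Int) :
    pvInnerA boxes p k c = true ↔ ∃ j, 1 ≤ j ∧ j ≤ k ∧ (pvG boxes)^[j] c = p := by
  induction k generalizing c with
  | zero => simp [pvInnerA]
  | succ k ih =>
    simp only [pvInnerA]
    by_cases h : PySem.List.pyGetD boxes c 0 = p
    · rw [if_pos h]
      constructor
      · intro _; exact ⟨1, le_refl _, by omega, by simpa [pvG] using h⟩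
      · intro _; rfl
    · rw [if_neg h, ih]
      constructor
      · rintro ⟨j, h1, h2, h3⟩
        refine ⟨j + 1, by omega, by omega, ?_⟩
        rw [Function.iterate_succ_apply]; exact h3
      · rintro ⟨j, h1, h2, h3⟩
        match j, h1 with
        | 1, _ =>
          exfalso; apply h
          simpa [pvG] using h3
        | j + 2, _ =>
          refine ⟨j + 1, by omega, by omega, ?_⟩
          rw [Function.iterate_succ_apply] at h3; exact h3

lemma pvG_mem (boxes : List Int) (c : Int) (h0 : 0 ≤ c) (h1 : c < boxes.length) :
    pvG boxes c ∈ boxes := by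
  unfold pvG
  rw [PySem.List.pyGetD_eq_getElem boxes 0 h0 h1]
  exact List.getElem_mem _

-- iterates of pvG stay inside [0, n) when all labels do
lemma pvG_iter_mem (boxes : List Int)
    (hb : ∀ x ∈ boxes, 0 ≤ x ∧ x < boxes.length) (p : Int)
    (hp : 0 ≤ p ∧ p < boxes.length) (i : Nat) :
    0 ≤ (pvG boxes)^[i] p ∧ (pvG boxes)^[i] p < boxes.length := by
  induction i with
  | zero => simpa using hp
  | succ i ih =>
    rw [Function.iterate_succ_apply']
    exact hb _ (pvG_mem boxes _ ih.1 ih.2)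

-- pigeonhole: a first return happens within n steps
lemma pv_min_return (boxes : List Int)
    (hb : ∀ x ∈ boxes, 0 ≤ x ∧ x < boxes.length) (p : Int)
    (hp : 0 ≤ p ∧ p < boxes.length) (j : Nat) (hj1 : 1 ≤ j)
    (hjp : (pvG boxes)^[j] p = p) :
    ∃ j', 1 ≤ j' ∧ j' ≤ boxes.length ∧ j' ≤ j ∧ (pvG boxes)^[j'] p = p := by
  classical
  have hex : ∃ m, 1 ≤ m ∧ (pvG boxes)^[m] p = p := ⟨j, hj1, hjp⟩
  have hj₀ := Nat.find_spec hex
  have hj₀j : Nat.find hex ≤ j := Nat.find_min' hex ⟨hj1, hjp⟩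
  have hinj : Function.Injective (fun i : Fin (Nat.find hex) =>
      (⟨((pvG boxes)^[(i : Nat)] p).toNat, by
        have := pvG_iter_mem boxes hb p hp (i : Nat); omega⟩ : Fin boxes.length)) := by
    intro a b hab
    by_contra hne
    have key : ∀ (a b : Fin (Nat.find hex)), a < b →
        (pvG boxes)^[(a : Nat)] p = (pvG boxes)^[(b : Nat)] p → False := by
      intro a b hlt heq
      have h1 : (pvG boxes)^[Nat.find hex - (b : Nat) + (a : Nat)] p = p := by
        rw [Function.iterate_add_apply, heq, ← Function.iterate_add_apply]
        have he : Nat.find hex - (b : Nat) + (b : Nat) = Nat.find hex := by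
          have := b.isLt; omega
        rw [he]; exact hj₀.2
      have hab' : (a : Nat) < (b : Nat) := hlt
      have hlt2 : Nat.find hex - (b : Nat) + (a : Nat) < Nat.find hex := by
        have := b.isLt; omega
      have hge : 1 ≤ Nat.find hex - (b : Nat) + (a : Nat) := by
        have := b.isLt; omega
      exact Nat.find_min hex hlt2 ⟨hge, h1⟩
    have heq : (pvG boxes)^[(a : Nat)] p = (pvG boxes)^[(b : Nat)] p := by
      have h1 := congrArg (fun x : Fin boxes.length => (x : Nat)) hab
      simp only at h1
      have ha := pvG_iter_mem boxes hb p hp (a : Nat)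
      have hbm := pvG_iter_mem boxes hb p hp (b : Nat)
      omega
    rcases lt_trichotomy a b with h | h | h
    · exact key a b h heq
    · exact hne h
    · exact key b a h heq.symm
  have hcard : Nat.find hex ≤ boxes.length := by
    have := Fintype.card_le_of_injective _ hinj
    simpa using this
  exact ⟨Nat.find hex, hj₀.1, hcard, hj₀j, hj₀.2⟩

-- the state of B's round loop after t rounds
lemma pvStepB_invariant (boxes : List Int) (t : Nat) :
    (List.range t).foldl (fun st _ => pvStepB boxes boxes.length st)
        ((List.range boxes.length).map (fun p => (Int.ofNat p)), List.replicate boxes.length false)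
      = ((List.range boxes.length).map (fun p => (pvG boxes)^[t] (Int.ofNat p)),
         (List.range boxes.length).map (fun p => pvHit boxes t (Int.ofNat p))) := by
  induction t with
  | zero =>
    simp only [List.range_zero, List.foldl_nil, Function.iterate_zero, id_eq, Prod.mk.injEq]
    constructor
    · trivial
    · have h0 : ∀ p : Nat, pvHit boxes 0 (Int.ofNat p) = false := by intro p; rfl
      simp only [h0]
      simp [List.eq_replicate_iff]
  | succ t ih =>
    rw [List.range_succ, List.foldl_append, List.foldl_cons, List.foldl_nil, ih]
    unfold pvStepB
    simp only [Prod.mk.injEq]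
    constructor
    · rw [List.map_map]
      apply List.map_congr_left
      intro p _
      simp only [Function.comp_apply, Function.iterate_succ_apply']
      rfl
    · apply List.map_congr_left
      intro p hpm
      simp only [List.mem_range] at hpm
      have hfound : (((List.range boxes.length).map
          (fun p => pvHit boxes t (Int.ofNat p))).getD p false) = pvHit boxes t (Int.ofNat p) := by
        rw [List.getD_eq_getElem?_getD, List.getElem?_map, List.getElem?_range hpm]
        rfl
      have hcur : ((((List.range boxes.length).map (fun p => (pvG boxes)^[t] (Int.ofNat p))).map
            (fun c => PySem.List.pyGetD boxes c 0)).getD p 0)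
          = (pvG boxes)^[t+1] (Int.ofNat p) := by
        rw [List.map_map, List.getD_eq_getElem?_getD, List.getElem?_map, List.getElem?_range hpm]
        simp only [Option.getD_some, Function.comp_apply, Function.iterate_succ_apply']
        rfl
      rw [hfound, hcur]
      apply Bool.eq_iff_iff.mpr
      simp only [Bool.or_eq_true, decide_eq_true_eq, pvHit_iff]
      constructor
      · rintro (⟨j, h1, h2, h3⟩ | h)
        · exact ⟨j, h1, by omega, h3⟩
        · exact ⟨t + 1, by omega, le_refl _, h⟩
      · rintro ⟨j, h1, h2, h3⟩
        by_cases hjt : j ≤ t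
        · exact Or.inl ⟨j, h1, hjt, h3⟩
        · have he : j = t + 1 := by omega
          subst he; exact Or.inr h3

-- adding 0/1 along a boolean list counts the trues
lemma pv_foldl_count (l : List Bool) (init : Int) :
    l.foldl (fun a b => a + (if b then (1 : Int) else 0)) init
      = init + (l.countP id : Int) := by
  induction l generalizing init with
  | nil => simp
  | cons b l ih =>
    simp only [List.foldl_cons, ih, List.countP_cons]
    cases b
    · simp
    · simp; ring

lemma pv_foldl_A_congr {α : Type} (l : List α) (f g : α → Bool) (init : Int)
    (h : ∀ x ∈ l, f x = g x) :
    l.foldl (fun acc p => if f p then acc + 1 else acc) init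
      = l.foldl (fun acc p => if g p then acc + 1 else acc) init := by
  induction l generalizing init with
  | nil => rfl
  | cons x l ih =>
    simp only [List.foldl_cons, h x (List.mem_cons_self)]
    exact ih _ (fun y hy => h y (List.mem_cons_of_mem _ hy))

-- A's conditional accumulation counts the successes
lemma pv_foldl_A_count {α : Type} (l : List α) (f : α → Bool) (init : Int) :
    l.foldl (fun acc p => if f p then acc + 1 else acc) init
      = init + (l.countP f : Int) := by
  induction l generalizing init with
  | nil => simp
  | cons x l ih =>
    simp only [List.foldl_cons, List.countP_cons]
    by_cases h : f x
    · simp [h, ih]; ring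
    · simp [h, ih]

-- ===== VERDICT (by name: the statement is the Claim_ definition above) =====
theorem loop_strategy_spec : Claim_equal_loop_strategy := by
  intro boxes N K _ hpre
  unfold Spec_loop_strategy loop_strategy loop_strategy_alt
  by_cases htriv : N ≤ 0 ∨ K ≤ 0
  · rw [if_pos htriv]
    rcases htriv with hN | hK
    · rw [PySem.List.pyRange_one_eq_nil (by omega)]
      rfl
    · have hK0 : K.toNat = 0 := by omega
      rw [hK0]
      rw [pv_foldl_A_congr _ _ (fun _ => false) 0 (by intro x _; rfl)]
      rw [pv_foldl_A_count]
      simp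
  · rw [if_neg htriv]
    rcases hpre with hN | hK | ⟨hNn, hb⟩
    · exact absurd (Or.inl hN) htriv
    · exact absurd (Or.inr hK) htriv
    have hN0 : 0 < N := by
      by_contra h
      exact htriv (Or.inl (by omega))
    simp only
    rw [pvStepB_invariant boxes]
    have htake : (((List.range boxes.length).map (fun p => pvHit boxes (min K.toNat boxes.length) (Int.ofNat p))).take N.toNat)
        = (List.range N.toNat).map (fun p => pvHit boxes (min K.toNat boxes.length) (Int.ofNat p)) := by
      rw [← List.map_take, List.take_range]
      have hmin : min N.toNat boxes.length = N.toNat := by omega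
      rw [hmin]
    rw [htake, pv_foldl_count, List.countP_map]
    rw [PySem.List.pyRange_one 0 N, List.foldl_map, pv_foldl_A_count]
    simp only [Int.sub_zero, zero_add]
    congr 1
    apply List.countP_congr
    intro p hpm
    simp only [List.mem_range] at hpm
    have hp : 0 ≤ (Int.ofNat p) ∧ (Int.ofNat p) < boxes.length := by
      simp only [Int.ofNat_eq_natCast]
      constructor
      · omega
      · omega
    simp only [Function.comp_apply, pvInnerA_iff, Function.comp, pvHit_iff, id_eq, zero_add]
    constructor
    · rintro ⟨j, h1, h2, h3⟩
      obtain ⟨j', h1', h2', h3', h4'⟩ := pv_min_return boxes hb (Int.ofNat p) hp j h1 h3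
      exact ⟨j', h1', by omega, h4'⟩
    · rintro ⟨j, h1, h2, h3⟩
      exact ⟨j, h1, by omega, h3⟩
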